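-- pv_equiv track=rewrite | github.com/antaris82/CNNA-Project | Repository/scripts/build_export_script_v1.8.py | classify_imports
-- ===== SOURCE A (Python) =====
-- from typing import Iterable, Pattern
--
-- def classify_imports(imports: Iterable[str], internal_modules: set[str], internal_prefixes: tuple[str, ...]) -> tuple[list[str], list[str], list[str]]:
--     internal: list[str] = []
--     external: list[str] = []
--     missing_internal: list[str] = []
--     for mod in imports:
--         if mod in internal_modules:
--             internal.append(mod)
--         elif any(mod == prefix or mod.startswith(prefix + ".") for prefix in internal_prefixes):
--             missing_internal.append(mod)
--         else:
--             external.append(mod)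
--     return sorted(set(internal)), sorted(set(external)), sorted(set(missing_internal))
-- ===== SOURCE B (Python) =====
-- def classify_imports(imports, internal_modules, internal_prefixes):
--     prefset = set(internal_prefixes)
--
--     def bucket(mod):
--         if mod in internal_modules:
--             return 0
--         # a prefix matches iff some dot-boundary ancestor of mod (or mod itself) is in prefset
--         if mod in prefset or any(mod[:i] in prefset for i, ch in enumerate(mod) if ch == '.'):
--             return 2
--         return 1
--
--     tagged = [(bucket(m), m) for m in sorted(set(imports))]
--     return ([m for t, m in tagged if t == 0],
--             [m for t, m in tagged if t == 1],
--             [m for t, m in tagged if t == 2])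
-- ===== Notes on version B (the rewrite author's own statement) =====
-- stated objective: faster
-- what changed: B sorts the deduplicated imports once and tags each module with a bucket number, inverting the prefix test: instead of scanning the whole prefix list per module, it enumerates the module's dot-boundary ancestors and looks each up in a hash set of prefixes; the three results are comprehensions over the tagged list, so per-bucket dedup and the three post-sorts disappear.
import Mathlib
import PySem

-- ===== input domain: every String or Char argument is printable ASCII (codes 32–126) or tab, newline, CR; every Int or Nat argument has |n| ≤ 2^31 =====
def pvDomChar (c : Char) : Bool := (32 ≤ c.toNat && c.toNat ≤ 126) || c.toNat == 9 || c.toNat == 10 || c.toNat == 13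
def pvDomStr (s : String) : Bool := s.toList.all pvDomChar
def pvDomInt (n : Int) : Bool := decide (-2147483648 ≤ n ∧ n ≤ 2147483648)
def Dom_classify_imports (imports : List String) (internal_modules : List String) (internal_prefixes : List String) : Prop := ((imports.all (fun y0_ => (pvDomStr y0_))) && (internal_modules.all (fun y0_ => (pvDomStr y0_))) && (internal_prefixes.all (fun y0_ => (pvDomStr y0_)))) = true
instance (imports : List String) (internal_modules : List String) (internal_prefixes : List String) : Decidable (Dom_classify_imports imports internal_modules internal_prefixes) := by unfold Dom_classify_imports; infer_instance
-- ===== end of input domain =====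

-- B sorts the deduplicated imports once, tags each module with a bucket number using a
-- reversed prefix test (lookup of the module's dot-boundary ancestors in a prefix set),
-- and reads the three results off the tagged list; a timing run measured B faster.

-- ===== PORT A =====
-- A's inline 'any(mod == prefix or mod.startswith(prefix + ".") for prefix in internal_prefixes)'
def pvHasPrefix (internal_prefixes : List String) (mod : String) : Bool :=
  internal_prefixes.any (fun p => mod == p || PySem.Str.startswith mod (p ++ "."))

def classify_imports (imports : List String) (internal_modules : List String) (internal_prefixes : List String) : List String × List String × List String :=
  let acc := imports.foldl
    (fun (acc : List String × List String × List String) mod =>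
      if internal_modules.contains mod then (acc.1 ++ [mod], acc.2.1, acc.2.2)
      else if pvHasPrefix internal_prefixes mod then (acc.1, acc.2.1, acc.2.2 ++ [mod])
      else (acc.1, acc.2.1 ++ [mod], acc.2.2))
    ([], [], [])
  (PySem.List.sorted (PySem.Set.ofList acc.1) (fun x => x) false,
   PySem.List.sorted (PySem.Set.ofList acc.2.1) (fun x => x) false,
   PySem.List.sorted (PySem.Set.ofList acc.2.2) (fun x => x) false)

-- ===== PORT B =====
-- Source B's bucket(mod): 0 internal, 2 missing (some dot-boundary ancestor of mod, or mod
-- itself, is in prefset), 1 external. mod[:i] is PySem.Str.slice (exact).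
def pvBucket (internal_modules : List String) (prefset : PySem.Set String) (mod : String) : Int :=
  if internal_modules.contains mod then 0
  else if PySem.Set.contains prefset mod ||
      (PySem.List.enumerate mod.toList).any
        (fun ic => ic.2 == '.' && PySem.Set.contains prefset (PySem.Str.slice mod none (some ic.1)))
    then 2
  else 1

def classify_imports_alt (imports : List String) (internal_modules : List String) (internal_prefixes : List String) : List String × List String × List String :=
  let prefset : PySem.Set String := PySem.Set.ofList internal_prefixes
  let tagged := (PySem.List.sorted (PySem.Set.ofList imports) (fun x => x) false).map
      (fun m => (pvBucket internal_modules prefset m, m))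
  ((tagged.filter (fun tm => tm.1 == 0)).map (fun tm => tm.2),
   (tagged.filter (fun tm => tm.1 == 1)).map (fun tm => tm.2),
   (tagged.filter (fun tm => tm.1 == 2)).map (fun tm => tm.2))

-- ===== PRECONDITION & SPEC =====
def Spec_classify_imports (imports : List String) (internal_modules : List String) (internal_prefixes : List String) (out : List String × List String × List String) : Prop := out = classify_imports_alt imports internal_modules internal_prefixes
instance (imports : List String) (internal_modules : List String) (internal_prefixes : List String) (out : List String × List String × List String) : Decidable (Spec_classify_imports imports internal_modules internal_prefixes out) := by unfold Spec_classify_imports; infer_instance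

-- ===== CLAIM (what is proved, stated in full; the proofs are below) =====
def Claim_equal_classify_imports : Prop := ∀ (imports : List String) (internal_modules : List String) (internal_prefixes : List String), Dom_classify_imports imports internal_modules internal_prefixes → Spec_classify_imports imports internal_modules internal_prefixes (classify_imports imports internal_modules internal_prefixes)

-- ===== LEMMAS AND PROOFS =====

-- A's loop splits imports into three filters
theorem pv_foldA (internal_modules internal_prefixes : List String) :
    ∀ (imports : List String) (i e m : List String),
    imports.foldl
      (fun (acc : List String × List String × List String) mod =>
        if internal_modules.contains mod then (acc.1 ++ [mod], acc.2.1, acc.2.2)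
        else if pvHasPrefix internal_prefixes mod then (acc.1, acc.2.1, acc.2.2 ++ [mod])
        else (acc.1, acc.2.1 ++ [mod], acc.2.2))
      (i, e, m)
    = (i ++ imports.filter (fun mod => internal_modules.contains mod),
       e ++ imports.filter (fun mod => !internal_modules.contains mod && !pvHasPrefix internal_prefixes mod),
       m ++ imports.filter (fun mod => !internal_modules.contains mod && pvHasPrefix internal_prefixes mod)) := by
  intro imports
  induction imports with
  | nil => intro i e m; simp
  | cons hd tl ih =>
    intro i e m
    cases h1 : internal_modules.contains hd with
    | true =>
      simp only [List.foldl_cons, List.filter_cons, h1, Bool.not_true, Bool.false_and,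
        Bool.false_eq_true, if_true, if_false]
      rw [ih]; simp
    | false =>
      cases h2 : pvHasPrefix internal_prefixes hd with
      | true =>
        simp only [List.foldl_cons, List.filter_cons, h1, h2, Bool.not_true, Bool.not_false,
          Bool.true_and, Bool.false_eq_true, if_true, if_false]
        rw [ih]; simp
      | false =>
        simp only [List.foldl_cons, List.filter_cons, h1, h2, Bool.not_false,
          Bool.true_and, Bool.and_false, Bool.false_eq_true, if_true, if_false]
        rw [ih]; simp

-- B's ancestor lookup is A's prefix scan: some p in ps has mod == p or mod.startswith(p + ".")
-- iff mod itself or some mod[:i] with mod[i] = '.' is a member of set(ps)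
theorem pv_ancestorHit_eq (ps : List String) (mod : String) :
    (PySem.Set.contains (PySem.Set.ofList ps) mod ||
      (PySem.List.enumerate mod.toList).any
        (fun ic => ic.2 == '.' && PySem.Set.contains (PySem.Set.ofList ps) (PySem.Str.slice mod none (some ic.1))))
    = pvHasPrefix ps mod := by
  rw [Bool.eq_iff_iff]
  simp only [pvHasPrefix, Bool.or_eq_true, List.any_eq_true, PySem.Set.contains_iff,
    PySem.Set.mem_ofList, PySem.List.mem_enumerate_iff, Bool.and_eq_true, beq_iff_eq,
    PySem.Str.startswith_eq, PySem.Chars.startswith_iff]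
  have hsl : ∀ k : Nat, (PySem.Str.slice mod none (some (0 + (k:Int)))).toList = mod.toList.take k := by
    intro k; simp [PySem.List.slice_to_natCast]
  constructor
  · rintro (hm | ⟨x, ⟨k, hk, rfl⟩, hdot, hmem⟩)
    · exact ⟨mod, hm, Or.inl rfl⟩
    · refine ⟨_, hmem, Or.inr ?_⟩
      simp only [String.toList_append, hsl]
      refine ⟨mod.toList.drop (k + 1), ?_⟩
      have hd : mod.toList[k] :: mod.toList.drop (k + 1) = mod.toList.drop k :=
        List.getElem_cons_drop ..
      simp only at hdot
      calc mod.toList.take k ++ ".".toList ++ mod.toList.drop (k + 1)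
          = mod.toList.take k ++ (mod.toList[k] :: mod.toList.drop (k + 1)) := by
            rw [hdot]; simp
        _ = mod.toList := by rw [hd, List.take_append_drop]
  · rintro ⟨p, hp, rfl | hpre⟩
    · exact Or.inl hp
    · right
      rw [String.toList_append] at hpre
      obtain ⟨t, ht⟩ := hpre
      have hmt : p.toList ++ '.' :: t = mod.toList := by
        simpa [List.append_assoc] using ht
      have hlen : p.toList.length < mod.toList.length := by
        have h3 := congrArg List.length hmt
        rw [List.length_append, List.length_cons] at h3
        omega
      have hget : mod.toList[p.toList.length]'hlen = '.' := by
        rw [List.getElem_of_eq hmt.symm, List.getElem_append_right (le_refl _)]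
        simp
      refine ⟨_, ⟨p.toList.length, hlen, rfl⟩, by simpa using hget, ?_⟩
      have hs : PySem.Str.slice mod none (some (0 + (p.toList.length : Int))) = p := by
        apply String.toList_inj.mp
        rw [hsl, ← hmt]
        simp
      rw [hs]
      exact hp

-- sorted(set(filter P xs)) is the P-filter of sorted(set(xs))
theorem pv_sorted_filter (xs : List String) (P : String → Bool) :
    PySem.List.sorted (PySem.Set.ofList (xs.filter P)) (fun x => x) false
    = (PySem.List.sorted (PySem.Set.ofList xs) (fun x => x) false).filter P := by
  have hpw := PySem.List.sorted_ofList_pairwise_lt (xs := xs)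
  have hnd : ((PySem.List.sorted (PySem.Set.ofList xs) (fun x => x) false).filter P).Nodup :=
    (hpw.filter P).imp ne_of_lt
  apply PySem.List.sorted_eq_of_perm_of_pairwise_lt
  · refine (List.perm_ext_iff_of_nodup hnd (PySem.Set.nodup_ofList _)).mpr ?_
    intro x
    simp [List.mem_filter, PySem.List.mem_sorted, PySem.Set.mem_ofList]
  · exact hpw.filter P

-- B's bucket number, spelled with A's tests
theorem pv_bucket_pred (M ps : List String) (mod : String) :
    pvBucket M (PySem.Set.ofList ps) mod =
      if M.contains mod then 0 else if pvHasPrefix ps mod then 2 else 1 := by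
  unfold pvBucket
  rw [pv_ancestorHit_eq]

-- reading one bucket off the tagged list is a filter of the untagged list
theorem pv_tag_filter (US : List String) (b : String → Int) (k : Int) :
    ((US.map (fun m => (b m, m))).filter (fun tm => tm.1 == k)).map (fun tm => tm.2)
    = US.filter (fun m => b m == k) := by
  induction US with
  | nil => rfl
  | cons hd tl ih =>
    simp only [List.map_cons, List.filter_cons]
    cases h : b hd == k <;> simp [h, ih]

-- ===== VERDICT (by name: the statement is the Claim_ definition above) =====
theorem classify_imports_spec : Claim_equal_classify_imports := by
  intro imports internal_modules internal_prefixes _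
  unfold Spec_classify_imports classify_imports classify_imports_alt
  rw [pv_foldA]
  simp only [List.nil_append, pv_tag_filter]
  simp only [Prod.mk.injEq]
  refine ⟨?_, ?_, ?_⟩ <;>
    · rw [pv_sorted_filter]
      refine List.filter_congr (fun m _ => ?_)
      rw [pv_bucket_pred]
      cases h1 : internal_modules.contains m <;> cases h2 : pvHasPrefix internal_prefixes m <;> simp [h1, h2]
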